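-- pv_equiv track=rewrite | github.com/pattenmlane/jsmayrepo | testing.py | all_same_except_at
-- ===== SOURCE A (Python) =====
-- def all_same_except_at(seq, ignore_indices, ignore_value='T'):
--     reference = None
--     for i, val in enumerate(seq):
--         if i in ignore_indices or val == ignore_value:
--             continue
--         if reference is None:
--             reference = val
--         elif val != reference:
--             return False
--     return True
-- ===== SOURCE B (Python) =====
-- def all_same_except_at(seq, ignore_indices, ignore_value='T'):
--     distinct = {val for i, val in enumerate(seq)
--                 if i not in ignore_indices and val != ignore_value}
--     return len(distinct) <= 1
-- ===== Notes on version B (the rewrite author's own statement) =====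
-- stated objective: alternative
-- what changed: Replaces the stateful reference-carrying loop with early exit by collecting the distinct kept values into a set and deciding uniformity as len(set) <= 1.
import Mathlib
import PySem

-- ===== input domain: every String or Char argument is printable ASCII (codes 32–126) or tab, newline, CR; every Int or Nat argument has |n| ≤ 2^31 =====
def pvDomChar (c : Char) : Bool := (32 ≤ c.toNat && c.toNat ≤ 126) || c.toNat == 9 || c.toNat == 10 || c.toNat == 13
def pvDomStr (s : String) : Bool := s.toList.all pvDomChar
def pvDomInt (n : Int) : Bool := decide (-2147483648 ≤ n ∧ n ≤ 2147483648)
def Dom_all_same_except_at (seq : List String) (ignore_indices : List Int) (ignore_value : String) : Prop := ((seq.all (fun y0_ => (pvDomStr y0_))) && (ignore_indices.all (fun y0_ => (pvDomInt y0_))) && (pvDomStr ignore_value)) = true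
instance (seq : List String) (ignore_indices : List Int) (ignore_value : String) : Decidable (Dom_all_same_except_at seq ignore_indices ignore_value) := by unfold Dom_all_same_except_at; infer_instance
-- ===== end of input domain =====

-- B replaces the stateful reference-carrying loop by a set of the distinct kept values and the check len(set) ≤ 1; equivalence of return values, no speed claim.
-- ===== PORT A =====
-- the loop over enumerate(seq) carrying the Optional `reference`, with early return False
def all_same_loopA (ignore_indices : List Int) (ignore_value : String)
    : List (Int × String) → Option String → Bool
  | [], _ => true
  | (i, val) :: rest, reference =>
    if ignore_indices.contains i || val == ignore_value then
      all_same_loopA ignore_indices ignore_value rest reference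
    else
      match reference with
      | none => all_same_loopA ignore_indices ignore_value rest (some val)
      | some r => if val != r then false else all_same_loopA ignore_indices ignore_value rest reference

def all_same_except_at (seq : List String) (ignore_indices : List Int) (ignore_value : String) : Bool :=
  all_same_loopA ignore_indices ignore_value (PySem.List.enumerate seq) none

-- ===== PORT B =====
def all_same_except_at_alt (seq : List String) (ignore_indices : List Int) (ignore_value : String) : Bool :=
  let distinct : PySem.Set String := PySem.Set.ofList
    (((PySem.List.enumerate seq).filter
        (fun p => !(ignore_indices.contains p.1) && p.2 != ignore_value)).map Prod.snd)
  decide (PySem.Set.len distinct ≤ 1)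

-- ===== PRECONDITION & SPEC =====
def Spec_all_same_except_at (seq : List String) (ignore_indices : List Int) (ignore_value : String) (out : Bool) : Prop := out = all_same_except_at_alt seq ignore_indices ignore_value
instance (seq : List String) (ignore_indices : List Int) (ignore_value : String) (out : Bool) : Decidable (Spec_all_same_except_at seq ignore_indices ignore_value out) := by unfold Spec_all_same_except_at; infer_instance

-- ===== CLAIM (what is proved, stated in full; the proofs are below) =====
def Claim_equal_all_same_except_at : Prop := ∀ (seq : List String) (ignore_indices : List Int) (ignore_value : String), Dom_all_same_except_at seq ignore_indices ignore_value → Spec_all_same_except_at seq ignore_indices ignore_value (all_same_except_at seq ignore_indices ignore_value)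

-- ===== LEMMAS AND PROOFS =====

-- loop A with reference = some r ↔ all kept values equal r
theorem loopA_some (ig : List Int) (iv : String) (l : List (Int × String)) (r : String) :
    all_same_loopA ig iv l (some r) =
      ((l.filter (fun p => !(ig.contains p.1 || p.2 == iv))).map Prod.snd).all (fun v => v == r) := by
  induction l with
  | nil => rfl
  | cons p rest ih =>
    obtain ⟨i, val⟩ := p
    by_cases h : i ∈ ig ∨ val = iv
    · rcases h with h | h <;> simp [all_same_loopA, h, ih]
    · rw [not_or] at h
      obtain ⟨h1, h2⟩ := h
      by_cases hv : val = r
      · simp [all_same_loopA, h1, hv, ih]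
      · simp [all_same_loopA, h1, h2, hv, bne_iff_ne]

-- all kept values equal the first kept value ↔ the set of kept values has at most one element
theorem all_eq_head_iff_setLen (h : String) (t : List String) :
    t.all (fun v => v == h) = decide (PySem.Set.len (PySem.Set.ofList (h :: t)) ≤ 1) := by
  rw [Bool.eq_iff_iff, PySem.Set.ofList_cons]
  have hlen : PySem.Set.len (h :: PySem.Set.discard (PySem.Set.ofList t) h) ≤ 1 ↔
      PySem.Set.discard (PySem.Set.ofList t) h = [] := by
    simp [PySem.Set.len, List.length_eq_zero_iff]
  simp only [decide_eq_true_eq, hlen, List.eq_nil_iff_forall_not_mem, PySem.Set.mem_discard,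
    PySem.Set.mem_ofList, List.all_eq_true, beq_iff_eq]
  constructor
  · rintro hall x ⟨hx, hne⟩; exact hne (hall x hx)
  · intro hnone v hv
    by_contra hne
    exact hnone v ⟨hv, hne⟩

-- loop A from reference = none computes B's set-cardinality check on the kept values
theorem loopA_none (ig : List Int) (iv : String) (l : List (Int × String)) :
    all_same_loopA ig iv l none =
      decide (PySem.Set.len (PySem.Set.ofList
        ((l.filter (fun p => !(ig.contains p.1 || p.2 == iv))).map Prod.snd)) ≤ 1) := by
  induction l with
  | nil => rfl
  | cons p rest ih =>
    obtain ⟨i, val⟩ := p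
    by_cases h : i ∈ ig ∨ val = iv
    · rcases h with h | h <;> simp [all_same_loopA, h, ih]
    · rw [not_or] at h
      obtain ⟨h1, h2⟩ := h
      rw [show List.filter (fun p => !(ig.contains p.1 || p.2 == iv)) ((i, val) :: rest) =
            (i, val) :: List.filter (fun p => !(ig.contains p.1 || p.2 == iv)) rest from by
          rw [List.filter_cons]; simp [h1, h2]]
      rw [List.map_cons, ← all_eq_head_iff_setLen]
      rw [show all_same_loopA ig iv ((i, val) :: rest) none =
            all_same_loopA ig iv rest (some val) from by simp [all_same_loopA, h1, h2]]
      exact loopA_some ig iv rest val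

-- B's filter predicate is A's predicate negated and de-Morganed
theorem filter_pred_eq (ig : List Int) (iv : String) (l : List (Int × String)) :
    l.filter (fun p => !(ig.contains p.1) && p.2 != iv) =
      l.filter (fun p => !(ig.contains p.1 || p.2 == iv)) := by
  apply List.filter_congr
  intro p _
  simp [Bool.not_or, bne]

-- ===== VERDICT (by name: the statement is the Claim_ definition above) =====
theorem all_same_except_at_spec : Claim_equal_all_same_except_at := by
  intro seq ig iv _
  unfold Spec_all_same_except_at all_same_except_at all_same_except_at_alt
  rw [filter_pred_eq]
  exact loopA_none ig iv _
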